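-- pv_equiv track=rewrite | github.com/cenuno/python_workout | python/exercise_07.py | ubbi_dubbi
-- ===== SOURCE A (Python) =====
-- def ubbi_dubbi(word: str) -> str:
--     """
--     Translate each word to Ubbi Dubbi.
--
--     In Ubbi Dubbi, every vowel (a, e, i, o, or u) is prefaced with ub.
--     In theory, you only put an ub before every vowel sound,
--     rather than before each vowel.
--
--     Args:
--         word (str): a word
--
--     Returns:
--         str: a word translated into Ubbi Dubbi
--
--     Examples:
--         >>> ubbi_dubbi("milk")
--         'mubilk'
--
--         >>> ubbi_dubbi("program")
--         'prubogrubam'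
--
--         >>> ubbi_dubbi("aardvark")
--         'ubaubardvubark'
--     """
--     # store constants
--     VOWELS = 'aeiou'
--     UB = 'ub'
--
--     # store new words
--     translation = []
--
--     # for each character, add the "UB" prefix to characters that are vowels
--     for char in word:
--         if char in VOWELS:
--             translation.append(UB + char)
--         else:
--             translation.append(char)
--
--     # return the translated version of the word
--     return "".join(translation)
-- ===== SOURCE B (Python) =====
-- def ubbi_dubbi(word: str) -> str:
--     # Staged global rewriting: one full-string replace pass per vowel.
--     # 'u' goes first, so the 'u' inside any "ub" inserted by a later pass is
--     # never itself prefixed (no other vowel occurs inside a replacement).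
--     for v in 'uaeio':
--         word = word.replace(v, 'ub' + v)
--     return word
-- ===== Notes on version B (the rewrite author's own statement) =====
-- stated objective: alternative
-- what changed: Replaces the per-character scan-and-accumulate loop with five staged whole-string replace passes (one per vowel, 'u' first so the 'u' inside an inserted 'ub' is never re-prefixed); the passes run at C level instead of a per-character Python loop.
import Mathlib
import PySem

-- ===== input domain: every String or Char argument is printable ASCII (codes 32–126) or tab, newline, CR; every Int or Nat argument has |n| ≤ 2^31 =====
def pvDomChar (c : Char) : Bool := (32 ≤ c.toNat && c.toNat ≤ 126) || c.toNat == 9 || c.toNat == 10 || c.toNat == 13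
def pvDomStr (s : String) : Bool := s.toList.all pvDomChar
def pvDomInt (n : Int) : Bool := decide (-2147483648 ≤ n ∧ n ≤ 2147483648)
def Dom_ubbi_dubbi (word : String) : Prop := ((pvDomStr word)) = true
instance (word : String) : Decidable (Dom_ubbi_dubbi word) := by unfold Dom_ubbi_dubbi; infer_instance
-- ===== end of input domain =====

-- B replaces A's per-character scan-and-accumulate with five staged whole-string
-- replace passes ('u' first so inserted "ub" is never re-prefixed); a timing run
-- measured B faster by a constant factor (C-level replace vs per-char Python loop).

-- ===== PORT A =====
-- A: loop over characters, append "ub"+char or char to a list, join at the end.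
def ubbi_dubbi (word : String) : String :=
  let VOWELS : String := "aeiou"
  let UB : List Char := "ub".toList
  let translation : List (List Char) :=
    word.toList.foldl (fun acc char =>
      if PySem.Chars.isIn [char] VOWELS.toList then
        acc ++ [UB ++ [char]]
      else
        acc ++ [[char]]) []
  String.ofList (PySem.Chars.join [] translation)

-- ===== PORT B =====
-- B: for v in 'uaeio': word = word.replace(v, 'ub' + v); return word
def ubbi_dubbi_alt (word : String) : String :=
  "uaeio".toList.foldl
    (fun w v => PySem.Str.replace w (String.ofList [v]) (String.ofList ['u', 'b', v])) word

-- ===== PRECONDITION & SPEC =====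
def Spec_ubbi_dubbi (word : String) (out : String) : Prop := out = ubbi_dubbi_alt word
instance (word : String) (out : String) : Decidable (Spec_ubbi_dubbi word out) := by unfold Spec_ubbi_dubbi; infer_instance

-- ===== CLAIM (what is proved, stated in full; the proofs are below) =====
def Claim_equal_ubbi_dubbi : Prop := ∀ (word : String), Dom_ubbi_dubbi word → Spec_ubbi_dubbi word (ubbi_dubbi word)

-- ===== LEMMAS AND PROOFS =====

-- a single-character replace pass is a per-character flatMap
theorem ubbi_replace_go_single (v : Char) (new : List Char) :
    ∀ (fuel : Nat) (l acc : List Char), l.length ≤ fuel →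
      PySem.Chars.replace.go [v] new fuel l acc =
        acc.reverse ++ l.flatMap (fun c => if c == v then new else [c]) := by
  intro fuel
  induction fuel with
  | zero =>
    intro l acc h
    have : l = [] := List.eq_nil_of_length_eq_zero (Nat.le_zero.mp h)
    subst this; simp [PySem.Chars.replace.go]
  | succ n ih =>
    intro l acc h
    cases l with
    | nil => simp [PySem.Chars.replace.go]
    | cons c t =>
      simp only [PySem.Chars.replace.go]
      by_cases hc : c = v
      · subst hc
        simp only [List.isPrefixOf, beq_self_eq_true, Bool.true_and,
          if_true, List.length_cons] at *
        simp only [List.length_nil, Nat.zero_add, List.drop_succ_cons, List.drop_zero]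
        rw [ih t (new.reverse ++ acc) (Nat.le_of_succ_le_succ h)]
        simp
      · have : ([v].isPrefixOf (c :: t)) = false := by
          simp [List.isPrefixOf]; exact fun hvc => absurd hvc.symm hc
        rw [this]
        simp only [Bool.false_eq_true, if_false]
        rw [ih t (c :: acc) (Nat.le_of_succ_le_succ (by simpa using h))]
        simp [hc]

theorem ubbi_replace_single (l : List Char) (v : Char) (new : List Char) :
    PySem.Chars.replace l [v] new =
      l.flatMap (fun c => if c == v then new else [c]) := by
  simp only [PySem.Chars.replace, List.isEmpty_cons, Bool.false_eq_true, if_false]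
  exact ubbi_replace_go_single v new l.length l [] (le_refl _)

-- per-character agreement: A's rule equals the composite of B's five passes
theorem ubbi_char_eq (c : Char) :
    (if PySem.Chars.isIn [c] "aeiou".toList then "ub".toList ++ [c] else [c]) =
      ((((([c].flatMap (fun x => if x == 'u' then ['u','b','u'] else [x])).flatMap
          (fun x => if x == 'a' then ['u','b','a'] else [x])).flatMap
          (fun x => if x == 'e' then ['u','b','e'] else [x])).flatMap
          (fun x => if x == 'i' then ['u','b','i'] else [x])).flatMap
          (fun x => if x == 'o' then ['u','b','o'] else [x])) := by
  by_cases ha : c = 'a' <;> by_cases he : c = 'e' <;> by_cases hi : c = 'i' <;>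
    by_cases ho : c = 'o' <;> by_cases hu : c = 'u' <;> subst_vars <;>
    first
    | decide
    | (simp [PySem.Chars.isIn, PySem.Chars.find, PySem.Chars.find.go, List.isPrefixOf,
        beq_eq_false_iff_ne.mpr ha, beq_eq_false_iff_ne.mpr he,
        beq_eq_false_iff_ne.mpr hi, beq_eq_false_iff_ne.mpr ho,
        beq_eq_false_iff_ne.mpr hu,
        if_neg ha, if_neg he, if_neg hi,
        if_neg ho, if_neg hu])

-- "".join is flatten
theorem ubbi_join_nil_flatten (parts : List (List Char)) :
    PySem.Chars.join [] parts = parts.flatten := by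
  induction parts with
  | nil => rfl
  | cons p ps ih =>
    cases ps with
    | nil => simp [PySem.Chars.join, List.intercalate]
    | cons q qs => rw [PySem.Chars.join_cons_cons] at *; simp_all

theorem ubbi_dubbi_spec' (word : String) : ubbi_dubbi word = ubbi_dubbi_alt word := by
  unfold ubbi_dubbi ubbi_dubbi_alt
  rw [show "uaeio".toList = ['u','a','e','i','o'] from rfl]
  simp only [List.foldl_cons, List.foldl_nil]
  -- B side: each pass is a flatMap on the character list
  have hchars : ∀ (s : String) (v : Char),
      PySem.Str.replace s (String.ofList [v]) (String.ofList ['u','b',v]) =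
        String.ofList (s.toList.flatMap (fun c => if c == v then ['u','b',v] else [c])) := by
    intro s v
    apply String.toList_injective
    simp [PySem.Str.toList_replace, String.toList_ofList, ubbi_replace_single]
  rw [hchars, hchars, hchars, hchars, hchars]
  simp only [String.toList_ofList]
  -- A side: the accumulate loop is map-then-join
  rw [show (fun (acc : List (List Char)) (char : Char) =>
        if PySem.Chars.isIn [char] "aeiou".toList then acc ++ ["ub".toList ++ [char]]
        else acc ++ [[char]]) =
      (fun acc char => acc ++ [if PySem.Chars.isIn [char] "aeiou".toList
        then "ub".toList ++ [char] else [char]]) from by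
    funext acc char; split <;> rfl]
  rw [PySem.List.foldl_append_singleton_eq_map]
  congr 1
  rw [List.nil_append, ubbi_join_nil_flatten, ← List.flatMap_def]
  simp only [List.flatMap_assoc]
  simp only [← List.flatMap_assoc]
  rw [show (fun c => if PySem.Chars.isIn [c] "aeiou".toList
        then "ub".toList ++ [c] else [c]) =
      (fun c => ((((([c].flatMap (fun x => if x == 'u' then ['u','b','u'] else [x])).flatMap
          (fun x => if x == 'a' then ['u','b','a'] else [x])).flatMap
          (fun x => if x == 'e' then ['u','b','e'] else [x])).flatMap
          (fun x => if x == 'i' then ['u','b','i'] else [x])).flatMap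
          (fun x => if x == 'o' then ['u','b','o'] else [x]))) from by
    funext c; exact ubbi_char_eq c]
  simp [List.flatMap_assoc]

-- ===== VERDICT (by name: the statement is the Claim_ definition above) =====
theorem ubbi_dubbi_spec : Claim_equal_ubbi_dubbi := by
  intro word _
  exact ubbi_dubbi_spec' word
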